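-- pv_equiv track=rewrite | github.com/syseitz/predTED | predted/features.py | find_stems
-- ===== SOURCE A (Python) =====
-- from typing import List, Tuple
--
-- def create_pair_table(structure: str) -> List[int]:
--     """Create a 1-based pair table.
--
--     ``pt[0]`` is unused (set to 0).  For *i* in 1..n, ``pt[i]`` is the
--     1-based index of the pairing partner, or 0 if position *i* is unpaired.
--     """
--     n = len(structure)
--     pt = [0] * (n + 1)
--     stack: List[int] = []
--     for i, c in enumerate(structure):
--         if c == '(':
--             stack.append(i + 1)
--         elif c == ')' and stack:
--             j = stack.pop()
--             pt[j] = i + 1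
--             pt[i + 1] = j
--     return pt
--
-- def find_stems(structure: str) -> List[int]:
--     """Return a list of stem lengths (only stems with length > 1)."""
--     pt = create_pair_table(structure)
--     n = len(structure)
--     stems: List[int] = []
--     visited = set()
--     i = 1
--     while i < n:  # C: for (i = 1; i < len; i++)
--         if pt[i] > i and i not in visited and pt[i] not in visited:
--             j = pt[i]
--             length = 1
--             while i + 1 <= n and pt[i + 1] == j - 1:
--                 i += 1
--                 j -= 1
--                 length += 1
--                 visited.add(i)
--                 visited.add(j)
--             if length > 1:
--                 stems.append(length)
--         i += 1
--     return stems
-- ===== SOURCE B (Python) =====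
-- from typing import List
--
-- def create_pair_table(structure: str) -> List[int]:
--     n = len(structure)
--     pt = [0] * (n + 1)
--     stack: List[int] = []
--     for i, c in enumerate(structure):
--         if c == '(':
--             stack.append(i + 1)
--         elif c == ')' and stack:
--             j = stack.pop()
--             pt[j] = i + 1
--             pt[i + 1] = j
--     return pt
--
-- def find_stems(structure: str) -> List[int]:
--     """Single flat pass over positions 1..n: maintain the current maximal
--     run where the pair-table value decreases by exactly 1; on each break
--     flush the run (record its length when >1 and its start is an opening)."""
--     pt = create_pair_table(structure)
--     n = len(structure)
--     stems: List[int] = []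
--     cur_start, cur_len = 0, 0
--     for i in range(1, n + 1):
--         if cur_len > 0 and pt[i] == pt[i - 1] - 1:
--             cur_len += 1
--         else:
--             if cur_len > 1 and pt[cur_start] > cur_start:
--                 stems.append(cur_len)
--             cur_start, cur_len = i, 1
--     if cur_len > 1 and pt[cur_start] > cur_start:
--         stems.append(cur_len)
--     return stems
-- ===== Notes on version B (the rewrite author's own statement) =====
-- stated objective: simpler
-- what changed: Replaced the nested while-loop with a visited set and run-jumping index arithmetic by a single flat pass over positions 1..n that tracks the current maximal run where the pair-table value decreases by exactly 1, flushing a run's length when it breaks (kept when length > 1 and the run starts at an opening base).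
import Mathlib
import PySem

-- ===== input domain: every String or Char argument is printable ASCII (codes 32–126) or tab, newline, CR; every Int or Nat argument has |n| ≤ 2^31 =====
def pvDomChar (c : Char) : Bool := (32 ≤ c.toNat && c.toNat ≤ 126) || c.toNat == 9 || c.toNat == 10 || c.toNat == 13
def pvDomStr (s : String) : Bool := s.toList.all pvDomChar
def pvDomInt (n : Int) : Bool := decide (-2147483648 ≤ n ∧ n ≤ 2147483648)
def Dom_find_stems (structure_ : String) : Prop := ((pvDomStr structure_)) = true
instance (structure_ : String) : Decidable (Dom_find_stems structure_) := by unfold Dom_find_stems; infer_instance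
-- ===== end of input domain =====

-- B replaces A's nested while-loop with a visited set by a single flat pass over
-- positions 1..n tracking maximal runs where the pair-table value decreases by 1 (objective: simpler).


-- ===== PORT A =====
-- shared module helper (A and B both call it, as in the Python module);
-- pt[j] / pt[i] accesses are always in range (indices come from enumerate/stack), so pySetD/pyGetD are exact here
-- one step of the for-loop: push an opening index, or pop and record a pair
def cptStep (acc : List Int × List Int) (ic : Int × Char) : List Int × List Int :=
  if ic.2 = '(' then (acc.1, acc.2 ++ [ic.1 + 1])
  else if ic.2 = ')' ∧ acc.2 ≠ [] then
    let j := acc.2.getLastD 0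
    (PySem.List.pySetD (PySem.List.pySetD acc.1 j (ic.1 + 1)) (ic.1 + 1) j, acc.2.dropLast)
  else acc

def create_pair_table (structure_ : String) : List Int :=
  let n := PySem.Str.len structure_
  ((PySem.List.enumerate structure_.toList 0).foldl cptStep
    (List.replicate (n.toNat + 1) 0, [])).1

-- small termination certificates for the loops (cited by name in decreasing_by;
-- inlined omega proofs make the recursion terms huge)
theorem pvDecInner {n i : Int} (h : i + 1 ≤ n) : (n - (i + 1)).toNat < (n - i).toNat := by omega
theorem pvDecOuterSkip {n i : Int} (h : i < n) : (n - (i + 1)).toNat < (n - i).toNat := by omega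
theorem pvDecOuterRun {n i r : Int} (h1 : i < n) (h2 : i ≤ r) :
    (n - (r + 1)).toNat < (n - i).toNat := by omega
theorem pvDecB {n i : Int} (h : i ≤ n) : (n + 1 - (i + 1)).toNat < (n + 1 - i).toNat := by omega

-- inner while loop of A: while i+1 <= n and pt[i+1] == j-1: i+=1; j-=1; length+=1; visited.add(i); visited.add(j)
def fsInner (pt : List Int) (n i j len : Int) (visited : PySem.Set Int) :
    Int × Int × PySem.Set Int :=
  if i + 1 ≤ n ∧ PySem.List.pyGetD pt (i + 1) 0 = j - 1 then
    fsInner pt n (i + 1) (j - 1) (len + 1) ((visited.add (i + 1)).add (j - 1))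
  else (i, len, visited)
termination_by (n - i).toNat
decreasing_by rename_i hc; exact pvDecInner hc.1

theorem fsInner_ge (pt : List Int) (n i j len : Int) (v : PySem.Set Int) :
    i ≤ (fsInner pt n i j len v).1 := by
  unfold fsInner
  split
  · have := fsInner_ge pt n (i + 1) (j - 1) (len + 1) ((v.add (i + 1)).add (j - 1))
    omega
  · simp
termination_by (n - i).toNat
decreasing_by omega

-- outer while loop of A
def fsOuter (pt : List Int) (n i : Int) (visited : PySem.Set Int) (stems : List Int) :
    List Int :=
  if i < n then
    if PySem.List.pyGetD pt i 0 > i ∧ visited.contains i = false ∧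
        visited.contains (PySem.List.pyGetD pt i 0) = false then
      let r := fsInner pt n i (PySem.List.pyGetD pt i 0) 1 visited
      fsOuter pt n (r.1 + 1) r.2.2 (stems ++ if r.2.1 > 1 then [r.2.1] else [])
    else fsOuter pt n (i + 1) visited stems
  else stems
termination_by (n - i).toNat
decreasing_by
  · rename_i hlt hcond
    exact pvDecOuterRun hlt (fsInner_ge pt n i (PySem.List.pyGetD pt i 0) 1 visited)
  · rename_i hlt hcond
    exact pvDecOuterSkip hlt

def find_stems (structure_ : String) : List Int :=
  let pt := create_pair_table structure_
  let n := PySem.Str.len structure_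
  fsOuter pt n 1 PySem.Set.empty []

-- ===== PORT B =====
-- flush of the current run (the repeated `if cur_len > 1 and pt[cur_start] > cur_start` in Source B)
def fsFlush (pt : List Int) (cs cl : Int) : List Int :=
  if cl > 1 ∧ PySem.List.pyGetD pt cs 0 > cs then [cl] else []

-- for i in range(1, n+1): extend the current run or flush it and start anew at i
def fsBLoop (pt : List Int) (n i cs cl : Int) (stems : List Int) : List Int :=
  if _h : i ≤ n then
    if cl > 0 ∧ PySem.List.pyGetD pt i 0 = PySem.List.pyGetD pt (i - 1) 0 - 1 then
      fsBLoop pt n (i + 1) cs (cl + 1) stems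
    else fsBLoop pt n (i + 1) i 1 (stems ++ fsFlush pt cs cl)
  else stems ++ fsFlush pt cs cl
termination_by (n + 1 - i).toNat
decreasing_by
  · exact pvDecB _h
  · exact pvDecB _h

def find_stems_alt (structure_ : String) : List Int :=
  let pt := create_pair_table structure_
  let n := PySem.Str.len structure_
  fsBLoop pt n 1 0 0 []

-- ===== PRECONDITION & SPEC =====
def Spec_find_stems (structure_ : String) (out : List Int) : Prop := out = find_stems_alt structure_
instance (structure_ : String) (out : List Int) : Decidable (Spec_find_stems structure_ out) := by unfold Spec_find_stems; infer_instance

-- ===== CLAIM (what is proved, stated in full; the proofs are below) =====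
def Claim_equal_find_stems : Prop := ∀ (structure_ : String), Dom_find_stems structure_ → Spec_find_stems structure_ (find_stems structure_)

-- ===== LEMMAS AND PROOFS =====

-- `gp pt k` is pt[k] for the in-range nonnegative indices used throughout
def gp (pt : List Int) (k : Int) : Int := PySem.List.pyGetD pt k 0

-- A's loops with the visited set erased (proof-side reference; A's checks never fire on a real pair table)
def fsInner2 (pt : List Int) (n i j len : Int) : Int × Int :=
  if i + 1 ≤ n ∧ PySem.List.pyGetD pt (i + 1) 0 = j - 1 then
    fsInner2 pt n (i + 1) (j - 1) (len + 1)
  else (i, len)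
termination_by (n - i).toNat
decreasing_by rename_i hc; exact pvDecInner hc.1

theorem fsInner2_ge (pt : List Int) (n i j len : Int) : i ≤ (fsInner2 pt n i j len).1 := by
  unfold fsInner2
  split
  · have := fsInner2_ge pt n (i + 1) (j - 1) (len + 1)
    omega
  · simp
termination_by (n - i).toNat
decreasing_by omega

def fsOuter2 (pt : List Int) (n i : Int) (stems : List Int) : List Int :=
  if i < n then
    if PySem.List.pyGetD pt i 0 > i then
      let r := fsInner2 pt n i (PySem.List.pyGetD pt i 0) 1
      fsOuter2 pt n (r.1 + 1) (stems ++ if r.2 > 1 then [r.2] else [])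
    else fsOuter2 pt n (i + 1) stems
  else stems
termination_by (n - i).toNat
decreasing_by
  · rename_i hlt hcond
    exact pvDecOuterRun hlt (fsInner2_ge pt n i (PySem.List.pyGetD pt i 0) 1)
  · rename_i hlt hcond
    exact pvDecOuterSkip hlt

-- the involution property of a pair table
def Invol (pt : List Int) (n : Int) : Prop :=
  ∀ k : Int, 1 ≤ k → k ≤ n → 1 ≤ gp pt k → gp pt (gp pt k) = k

-- the visited-set invariant: everything visited lies strictly left of i or is a pair-table value of such a position
def VInv (pt : List Int) (n i : Int) (v : PySem.Set Int) : Prop :=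
  ∀ x ∈ v, x < i ∨ ∃ w : Int, 1 ≤ w ∧ w < i ∧ w ≤ n ∧ gp pt w = x

theorem fsInner2_le (pt : List Int) (n i j len : Int) (h : i ≤ n) :
    (fsInner2 pt n i j len).1 ≤ n := by
  unfold fsInner2
  split
  · exact fsInner2_le pt n (i + 1) (j - 1) (len + 1) (by omega)
  · simpa using h
termination_by (n - i).toNat
decreasing_by omega

theorem fsInner_eq_fsInner2 (pt : List Int) (n i j len : Int) (v : PySem.Set Int) :
    (fsInner pt n i j len v).1 = (fsInner2 pt n i j len).1 ∧
    (fsInner pt n i j len v).2.1 = (fsInner2 pt n i j len).2 := by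
  unfold fsInner fsInner2
  split
  · exact fsInner_eq_fsInner2 pt n (i + 1) (j - 1) (len + 1) _
  · simp
termination_by (n - i).toNat
decreasing_by all_goals omega

theorem fsInner_visited (pt : List Int) (n i j len : Int) (v : PySem.Set Int) :
    ∀ x ∈ (fsInner pt n i j len v).2.2,
      x ∈ v ∨ ∃ w : Int, i + 1 ≤ w ∧ w ≤ (fsInner pt n i j len v).1 ∧
        (x = w ∨ x = gp pt w) := by
  unfold fsInner
  split
  case isTrue h =>
    intro x hx
    have IH := fsInner_visited pt n (i + 1) (j - 1) (len + 1) ((v.add (i + 1)).add (j - 1)) x hx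
    have hge := fsInner_ge pt n (i + 1) (j - 1) (len + 1) ((v.add (i + 1)).add (j - 1))
    rcases IH with hv' | ⟨w, hw1, hw2, hw3⟩
    · rcases (PySem.Set.mem_add _ _ _).1 hv' with hv'' | rfl
      · rcases (PySem.Set.mem_add _ _ _).1 hv'' with hv | rfl
        · exact Or.inl hv
        · exact Or.inr ⟨i + 1, by omega, by omega, Or.inl rfl⟩
      · refine Or.inr ⟨i + 1, by omega, by omega, Or.inr ?_⟩
        simp [gp, h.2]
    · exact Or.inr ⟨w, by omega, hw2, hw3⟩
  case isFalse h =>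
    intro x hx
    exact Or.inl hx
termination_by (n - i).toNat
decreasing_by omega

theorem fsOuter_eq_fsOuter2 (pt : List Int) (n : Int) (hinv : Invol pt n)
    (i : Int) (v : PySem.Set Int) (stems : List Int) (h1 : 1 ≤ i) (hV : VInv pt n i v) :
      fsOuter pt n i v stems = fsOuter2 pt n i stems := by
  rw [fsOuter, fsOuter2]
  split
  case isTrue hlt =>
    by_cases hgt : PySem.List.pyGetD pt i 0 > i
    · have hmem : ∀ x ∈ v, x ≠ i ∧ x ≠ PySem.List.pyGetD pt i 0 := by
        intro x hx
        rcases hV x hx with hxi | ⟨w, hw1, hw2, hw3, hw4⟩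
        · constructor <;> (intro rfl; omega)
        · constructor
          · intro rfl
            have := hinv w hw1 hw3 (by simp only [gp] at hw4 ⊢; omega)
            rw [hw4] at this
            simp only [gp] at this hgt
            omega
          · intro hxeq
            have h2 := hinv w hw1 hw3 (by simp only [gp] at hw4 hxeq hgt ⊢; omega)
            have h3 := hinv i (by omega) (by omega) (by simp only [gp] at hgt ⊢; omega)
            rw [hw4, hxeq] at h2
            simp only [gp] at h2 h3
            rw [h2] at h3
            omega
      have hci : v.contains i = false := by
        rcases Bool.eq_false_or_eq_true (v.contains i) with h | h
        · exact absurd rfl ((hmem i ((PySem.Set.contains_iff v i).1 h)).1)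
        · exact h
      have hcp : v.contains (PySem.List.pyGetD pt i 0) = false := by
        rcases Bool.eq_false_or_eq_true (v.contains (PySem.List.pyGetD pt i 0)) with h | h
        · exact absurd rfl ((hmem _ ((PySem.Set.contains_iff v _).1 h)).2)
        · exact h
      rw [if_pos ⟨hgt, hci, hcp⟩, if_pos hgt]
      have he := fsInner_eq_fsInner2 pt n i (PySem.List.pyGetD pt i 0) 1 v
      show fsOuter pt n ((fsInner pt n i (PySem.List.pyGetD pt i 0) 1 v).1 + 1)
          (fsInner pt n i (PySem.List.pyGetD pt i 0) 1 v).2.2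
          (stems ++ if (fsInner pt n i (PySem.List.pyGetD pt i 0) 1 v).2.1 > 1
                    then [(fsInner pt n i (PySem.List.pyGetD pt i 0) 1 v).2.1] else [])
        = fsOuter2 pt n ((fsInner2 pt n i (PySem.List.pyGetD pt i 0) 1).1 + 1)
          (stems ++ if (fsInner2 pt n i (PySem.List.pyGetD pt i 0) 1).2 > 1
                    then [(fsInner2 pt n i (PySem.List.pyGetD pt i 0) 1).2] else [])
      rw [he.1, he.2]
      have hge := fsInner2_ge pt n i (PySem.List.pyGetD pt i 0) 1
      have hle := fsInner2_le pt n i (PySem.List.pyGetD pt i 0) 1 (by omega)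
      refine fsOuter_eq_fsOuter2 pt n hinv _ _ _ (by omega) ?_
      intro x hx
      rcases fsInner_visited pt n i (PySem.List.pyGetD pt i 0) 1 v x hx with hxv | ⟨w, hw1, hw2, hw3⟩
      · rcases hV x hxv with hxi | ⟨w, hw1, hw2, hw3, hw4⟩
        · left; omega
        · right; exact ⟨w, hw1, by omega, hw3, hw4⟩
      · rw [he.1] at hw2
        rcases hw3 with rfl | rfl
        · left; omega
        · right; exact ⟨w, by omega, by omega, by omega, rfl⟩
    · rw [if_neg (fun hc => hgt hc.1), if_neg hgt]
      refine fsOuter_eq_fsOuter2 pt n hinv (i + 1) v stems (by omega) ?_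
      intro x hx
      rcases hV x hx with hxi | ⟨w, hw1, hw2, hw3, hw4⟩
      · left; omega
      · right; exact ⟨w, hw1, by omega, hw3, hw4⟩
  case isFalse hlt => rfl
termination_by (n - i).toNat
decreasing_by
  · have := fsInner2_ge pt n i (PySem.List.pyGetD pt i 0) 1
    omega
  · omega

-- the grand alignment of fsOuter2 with B's flat pass, three phases at index i:
-- R: inside an opening run; F: fresh start at i; G: inside a closing run
theorem grand (pt : List Int) (n : Int) : ∀ μ : Nat, ∀ i : Int, (n + 1 - i).toNat = μ →
    ((∀ cs len S, 1 ≤ cs → cs ≤ i → i ≤ n → gp pt cs > cs → len = i - cs + 1 →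
        fsBLoop pt n (i + 1) cs len S =
          fsOuter2 pt n ((fsInner2 pt n i (gp pt i) len).1 + 1)
            (S ++ if (fsInner2 pt n i (gp pt i) len).2 > 1
                  then [(fsInner2 pt n i (gp pt i) len).2] else [])) ∧
     (∀ S, 1 ≤ i → i ≤ n → fsOuter2 pt n i S = fsBLoop pt n (i + 1) i 1 S) ∧
     (∀ cs cl S, 1 ≤ cs → gp pt cs ≤ cs → gp pt (i - 1) ≤ i - 1 → 1 ≤ cl → 2 ≤ i →
        fsBLoop pt n i cs cl S = fsOuter2 pt n i S)) := by
  intro μ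
  induction μ using Nat.strong_induction_on with
  | _ μ IH =>
    intro i hμ
    have hR : ∀ cs len S, 1 ≤ cs → cs ≤ i → i ≤ n → gp pt cs > cs → len = i - cs + 1 →
        fsBLoop pt n (i + 1) cs len S =
          fsOuter2 pt n ((fsInner2 pt n i (gp pt i) len).1 + 1)
            (S ++ if (fsInner2 pt n i (gp pt i) len).2 > 1
                  then [(fsInner2 pt n i (gp pt i) len).2] else []) := by
      intro cs len S hcs1 hcsi hin hop hlen
      by_cases hg : i + 1 ≤ n ∧ PySem.List.pyGetD pt (i + 1) 0 = gp pt i - 1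
      · have e2 : fsInner2 pt n i (gp pt i) len
            = fsInner2 pt n (i + 1) (gp pt i - 1) (len + 1) := by
          rw [fsInner2]; rw [if_pos hg]
        have hg1 : gp pt (i + 1) = gp pt i - 1 := hg.2
        have hstep : fsBLoop pt n (i + 1) cs len S = fsBLoop pt n (i + 1 + 1) cs (len + 1) S := by
          rw [fsBLoop]
          rw [dif_pos hg.1, if_pos]
          refine ⟨by omega, ?_⟩
          have : i + 1 - 1 = i := by ring
          rw [this]
          exact hg.2
        rw [hstep, e2, ← hg1]
        exact (IH (n + 1 - (i + 1)).toNat (by omega) (i + 1) rfl).1 cs (len + 1) S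
          hcs1 (by omega) hg.1 hop (by omega)
      · have e2 : fsInner2 pt n i (gp pt i) len = (i, len) := by
          rw [fsInner2]; rw [if_neg hg]
        rw [e2]
        by_cases hi1 : i + 1 ≤ n
        · have hnx : ¬ (PySem.List.pyGetD pt (i + 1) 0 = gp pt i - 1) := fun hc => hg ⟨hi1, hc⟩
          have hstep : fsBLoop pt n (i + 1) cs len S
              = fsBLoop pt n (i + 1 + 1) (i + 1) 1 (S ++ fsFlush pt cs len) := by
            rw [fsBLoop]
            rw [dif_pos hi1, if_neg]
            intro hc
            apply hnx
            have : i + 1 - 1 = i := by ring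
            rw [this] at hc
            exact hc.2
          have hfl : fsFlush pt cs len = if len > 1 then [len] else [] := by
            simp only [fsFlush, gp] at hop ⊢
            by_cases hl : len > 1
            · rw [if_pos ⟨hl, hop⟩, if_pos hl]
            · rw [if_neg (fun hc => hl hc.1), if_neg hl]
          rw [hstep, hfl]
          exact ((IH (n + 1 - (i + 1)).toNat (by omega) (i + 1) rfl).2.1
            (S ++ if len > 1 then [len] else []) (by omega) hi1).symm
        · rw [fsBLoop]
          rw [dif_neg hi1]
          rw [fsOuter2]
          rw [if_neg (by omega : ¬ (i + 1 < n))]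
          have hfl : fsFlush pt cs len = if len > 1 then [len] else [] := by
            simp only [fsFlush, gp] at hop ⊢
            by_cases hl : len > 1
            · rw [if_pos ⟨hl, hop⟩, if_pos hl]
            · rw [if_neg (fun hc => hl hc.1), if_neg hl]
          rw [hfl]
    have hF : ∀ S, 1 ≤ i → i ≤ n → fsOuter2 pt n i S = fsBLoop pt n (i + 1) i 1 S := by
      intro S h1 hin
      by_cases hlt : i < n
      · by_cases hgt : PySem.List.pyGetD pt i 0 > i
        · rw [fsOuter2]
          rw [if_pos hlt, if_pos hgt]
          exact (hR i 1 S h1 le_rfl hin hgt (by ring)).symm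
        · rw [fsOuter2]
          rw [if_pos hlt, if_neg hgt]
          have hi1 : i + 1 ≤ n := by omega
          by_cases hx : PySem.List.pyGetD pt (i + 1) 0 = PySem.List.pyGetD pt (i + 1 - 1) 0 - 1
          · have hstep : fsBLoop pt n (i + 1) i 1 S = fsBLoop pt n (i + 1 + 1) i 2 S := by
              rw [fsBLoop]
              rw [dif_pos hi1, if_pos ⟨by omega, hx⟩]
              norm_num
            have hgi1 : gp pt (i + 1) ≤ i - 1 := by
              have : i + 1 - 1 = i := by ring
              rw [this] at hx
              simp only [gp] at hgt ⊢
              omega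
            have hG2 := (IH (n + 1 - (i + 2)).toNat (by omega) (i + 2) rfl).2.2
              i 2 S h1 (by simp only [gp] at hgt ⊢; omega)
              (by have e : (i : ℤ) + 2 - 1 = i + 1 := by ring
                  rw [e]; omega) (by omega) (by omega)
            rw [hstep, show (i : ℤ) + 1 + 1 = i + 2 from by ring, hG2]
            by_cases hlt1 : i + 1 < n
            · conv_lhs => rw [fsOuter2]
              rw [if_pos hlt1, if_neg (by simp only [gp] at hgi1; omega :
                  ¬ PySem.List.pyGetD pt (i + 1) 0 > i + 1)]
              rw [show (i : ℤ) + 1 + 1 = i + 2 from by ring]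
            · conv_lhs => rw [fsOuter2]
              conv_rhs => rw [fsOuter2]
              rw [if_neg (by omega : ¬ (i + 1 < n)), if_neg (by omega : ¬ (i + 2 < n))]
          · have hstep : fsBLoop pt n (i + 1) i 1 S
                = fsBLoop pt n (i + 1 + 1) (i + 1) 1 (S ++ fsFlush pt i 1) := by
              rw [fsBLoop]
              rw [dif_pos hi1, if_neg (fun hc => hx hc.2)]
            have hfl : fsFlush pt i 1 = [] := by
              simp [fsFlush]
            rw [hstep, hfl, List.append_nil]
            exact (IH (n + 1 - (i + 1)).toNat (by omega) (i + 1) rfl).2.1 S (by omega) hi1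
      · rw [fsOuter2]
        rw [if_neg hlt]
        rw [fsBLoop]
        rw [dif_neg (by omega : ¬ (i + 1 ≤ n))]
        have hfl : fsFlush pt i 1 = [] := by simp [fsFlush]
        rw [hfl, List.append_nil]
    have hG : ∀ cs cl S, 1 ≤ cs → gp pt cs ≤ cs → gp pt (i - 1) ≤ i - 1 → 1 ≤ cl → 2 ≤ i →
        fsBLoop pt n i cs cl S = fsOuter2 pt n i S := by
      intro cs cl S hcs1 hclose hprev hcl hi2
      by_cases hin' : i ≤ n
      · by_cases hx : PySem.List.pyGetD pt i 0 = PySem.List.pyGetD pt (i - 1) 0 - 1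
        · have hstep : fsBLoop pt n i cs cl S = fsBLoop pt n (i + 1) cs (cl + 1) S := by
            rw [fsBLoop]
            rw [dif_pos hin', if_pos ⟨by omega, hx⟩]
          have hgi : gp pt i ≤ i - 2 := by
            simp only [gp] at hprev ⊢
            omega
          have hG1 := (IH (n + 1 - (i + 1)).toNat (by omega) (i + 1) rfl).2.2
            cs (cl + 1) S hcs1 hclose
            (by have e : (i : ℤ) + 1 - 1 = i := by ring
                rw [e]; omega) (by omega) (by omega)
          rw [hstep, hG1]
          by_cases hlt : i < n
          · conv_rhs => rw [fsOuter2]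
            rw [if_pos hlt, if_neg (by simp only [gp] at hgi; omega :
                ¬ PySem.List.pyGetD pt i 0 > i)]
          · conv_lhs => rw [fsOuter2]
            conv_rhs => rw [fsOuter2]
            rw [if_neg (by omega : ¬ (i < n)), if_neg (by omega : ¬ (i + 1 < n))]
        · have hstep : fsBLoop pt n i cs cl S
              = fsBLoop pt n (i + 1) i 1 (S ++ fsFlush pt cs cl) := by
            rw [fsBLoop]
            rw [dif_pos hin', if_neg (fun hc => hx hc.2)]
          have hfl : fsFlush pt cs cl = [] := by
            simp only [fsFlush, gp] at hclose ⊢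
            rw [if_neg (fun hc => by omega)]
          rw [hstep, hfl, List.append_nil]
          exact (hF S (by omega) hin').symm
      · rw [fsBLoop]
        rw [dif_neg hin']
        rw [fsOuter2]
        rw [if_neg (by omega : ¬ (i < n))]
        have hfl : fsFlush pt cs cl = [] := by
          simp only [fsFlush, gp] at hclose ⊢
          rw [if_neg (fun hc => by omega)]
        rw [hfl, List.append_nil]
    exact ⟨hR, hF, hG⟩

theorem gp_set (pt : List Int) (a v k : Int) (h0a : 0 ≤ a) (ha : a < (pt.length : Int))
    (h0k : 0 ≤ k) (hk : k < (pt.length : Int)) :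
    gp (PySem.List.pySetD pt a v) k = if k = a then v else gp pt k := by
  have h1 : PySem.List.pySetD pt a v = pt.set a.toNat v := PySem.List.pySetD_of_nonneg pt v h0a
  rw [gp, gp, h1]
  rw [PySem.List.pyGetD_eq_getElem (pt.set a.toNat v) 0 h0k (by simpa using hk),
      PySem.List.pyGetD_eq_getElem pt 0 h0k hk]
  by_cases hka : k = a
  · subst hka
    rw [List.getElem_set_self, if_pos rfl]
  · rw [List.getElem_set_ne (by omega), if_neg hka]

-- invariant of the pair-table construction after processing the first m characters
def CInv (n m : Int) (pt stack : List Int) : Prop :=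
  m ≤ n ∧ (pt.length : Int) = n + 1 ∧
  (∀ k : Int, 1 ≤ k → k ≤ n → 1 ≤ gp pt k →
      k ≤ m ∧ gp pt k ≤ m ∧ gp pt (gp pt k) = k) ∧
  (∀ s ∈ stack, 1 ≤ s ∧ s ≤ m ∧ gp pt s = 0) ∧
  stack.Pairwise (· < ·) ∧
  (∀ k : Int, m < k → k ≤ n → gp pt k = 0)

theorem cpt_step_inv (n m : Int) (pt stack : List Int) (c : Char) (hm : 0 ≤ m)
    (hmn : m + 1 ≤ n) (hI : CInv n m pt stack) :
    CInv n (m + 1) (cptStep (pt, stack) (m, c)).1 (cptStep (pt, stack) (m, c)).2 := by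
  obtain ⟨hmn', hlen, hA, hB, hP, hC⟩ := hI
  by_cases hc1 : c = '('
  · have hstep : cptStep (pt, stack) (m, c) = (pt, stack ++ [m + 1]) := by
      simp [cptStep, hc1]
    rw [hstep]
    dsimp only
    refine ⟨by omega, hlen, ?_, ?_, ?_, ?_⟩
    · intro k h1 h2 h3
      have := hA k h1 h2 h3
      exact ⟨by omega, by omega, this.2.2⟩
    · intro x hx
      rcases List.mem_append.1 hx with hx | hx
      · have := hB x hx
        exact ⟨this.1, by omega, this.2.2⟩
      · rcases List.mem_singleton.1 hx with rfl
        exact ⟨by omega, le_refl _, hC (m + 1) (by omega) (by omega)⟩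
    · refine List.pairwise_append.2 ⟨hP, List.pairwise_singleton _ _, ?_⟩
      intro a ha b hb
      rcases List.mem_singleton.1 hb with rfl
      have := hB a ha
      omega
    · intro k h1 h2
      exact hC k (by omega) h2
  · by_cases hc2 : c = ')' ∧ stack ≠ []
    · have hstep : cptStep (pt, stack) (m, c) =
          (PySem.List.pySetD (PySem.List.pySetD pt (stack.getLastD 0) (m + 1)) (m + 1)
            (stack.getLastD 0), stack.dropLast) := by
        simp [cptStep, hc2.1, hc2.2]
      rw [hstep]
      have hst : stack ≠ [] := hc2.2
      set j := stack.getLastD 0 with hj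
      have hjlast : j = stack.getLast hst := by
        rw [hj, List.getLastD_eq_getLast?, List.getLast?_eq_some_getLast hst]
        rfl
      have hjmem : j ∈ stack := by
        rw [hjlast]; exact List.getLast_mem hst
      obtain ⟨hj1, hjm, hj0⟩ := hB j hjmem
      have hdl : ∀ x ∈ stack.dropLast, x < j := by
        intro x hx
        have hsplit : stack.dropLast ++ [stack.getLast hst] = stack :=
          List.dropLast_append_getLast hst
        have hPP : (stack.dropLast ++ [stack.getLast hst]).Pairwise (· < ·) := by
          rw [hsplit]; exact hP
        have := (List.pairwise_append.1 hPP).2.2 x hx (stack.getLast hst)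
          (List.mem_singleton_self _)
        rw [hjlast]
        exact this
      set pt2 := PySem.List.pySetD (PySem.List.pySetD pt j (m + 1)) (m + 1) j with hpt2
      have hlen1 : ((PySem.List.pySetD pt j (m + 1)).length : Int) = n + 1 := by
        rw [PySem.List.length_pySetD]; exact hlen
      have hlen2 : (pt2.length : Int) = n + 1 := by
        rw [hpt2, PySem.List.length_pySetD]; exact hlen1
      have gpP : ∀ k : Int, 0 ≤ k → k ≤ n →
          gp pt2 k = if k = m + 1 then j else if k = j then m + 1 else gp pt k := by
        intro k h0 hkn
        rw [hpt2, gp_set _ _ _ _ (by omega) (by omega) h0 (by omega)]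
        by_cases hk1 : k = m + 1
        · rw [if_pos hk1, if_pos hk1]
        · rw [if_neg hk1, if_neg hk1,
              gp_set _ _ _ _ (by omega) (by omega) h0 (by omega)]
      refine ⟨by omega, hlen2, ?_, ?_, ?_, ?_⟩
      · intro k h1 h2 h3
        rw [gpP k (by omega) h2] at h3 ⊢
        by_cases hk1 : k = m + 1
        · rw [if_pos hk1] at h3 ⊢
          rw [gpP j (by omega) (by omega), if_neg (by omega), if_pos rfl]
          omega
        · rw [if_neg hk1] at h3 ⊢
          by_cases hkj : k = j
          · rw [if_pos hkj] at h3 ⊢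
            rw [gpP (m + 1) (by omega) (by omega), if_pos rfl]
            omega
          · rw [if_neg hkj] at h3 ⊢
            obtain ⟨hkm, hgm, hgg⟩ := hA k h1 h2 h3
            have hgj : gp pt k ≠ j := by
              intro he
              rw [he] at hgg
              omega
            rw [gpP (gp pt k) (by omega) (by omega), if_neg (by omega), if_neg hgj]
            exact ⟨by omega, by omega, hgg⟩
      · intro x hx
        have hxs : x ∈ stack := List.mem_of_mem_dropLast hx
        obtain ⟨hx1, hxm, hx0⟩ := hB x hxs
        have hxj : x < j := hdl x hx
        refine ⟨hx1, by omega, ?_⟩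
        rw [gpP x (by omega) (by omega), if_neg (by omega), if_neg (by omega)]
        exact hx0
      · exact hP.sublist (List.dropLast_sublist _)
      · intro k h1 h2
        rw [gpP k (by omega) h2, if_neg (by omega), if_neg (by omega)]
        exact hC k (by omega) h2
    · have hstep : cptStep (pt, stack) (m, c) = (pt, stack) := by
        simp only [cptStep]
        rw [if_neg (by simpa using hc1), if_neg (by simpa using hc2)]
      rw [hstep]
      dsimp only
      refine ⟨by omega, hlen, ?_, ?_, hP, ?_⟩
      · intro k h1 h2 h3
        have := hA k h1 h2 h3
        exact ⟨by omega, by omega, this.2.2⟩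
      · intro x hx
        have := hB x hx
        exact ⟨this.1, by omega, this.2.2⟩
      · intro k h1 h2
        exact hC k (by omega) h2

theorem cpt_fold_inv (n : Int) : ∀ (l : List Char) (m : Int) (pt stack : List Int),
    0 ≤ m → m + l.length = n → CInv n m pt stack →
    CInv n n ((PySem.List.enumerate l m).foldl cptStep (pt, stack)).1
      ((PySem.List.enumerate l m).foldl cptStep (pt, stack)).2 := by
  intro l
  induction l with
  | nil =>
    intro m pt stack hm hsum hI
    simp only [List.length_nil, Nat.cast_zero, add_zero] at hsum
    subst hsum
    simpa [PySem.List.enumerate_nil] using hI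
  | cons c l IHl =>
    intro m pt stack hm hsum hI
    rw [PySem.List.enumerate_cons]
    simp only [List.foldl_cons]
    have hsum' : (m + 1) + (l.length : Int) = n := by
      simp only [List.length_cons] at hsum
      push_cast at hsum ⊢
      omega
    have hstep := cpt_step_inv n m pt stack c hm (by omega) hI
    have := IHl (m + 1) (cptStep (pt, stack) (m, c)).1 (cptStep (pt, stack) (m, c)).2
      (by omega) hsum' hstep
    simpa using this

theorem cpt_invol (structure_ : String) :
    Invol (create_pair_table structure_) (PySem.Str.len structure_) := by
  have hlenq : PySem.Str.len structure_ = (structure_.toList.length : Int) := by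
    simp [PySem.Str.len_eq]
  set n := PySem.Str.len structure_ with hn
  have h0n : 0 ≤ n := by rw [hlenq]; positivity
  have hginit : ∀ k : Int, 0 ≤ k → k ≤ n → gp (List.replicate (n.toNat + 1) 0) k = 0 := by
    intro k h0 hk
    rw [gp, PySem.List.pyGetD_eq_getElem (List.replicate (n.toNat + 1) 0) 0 h0
      (by simp; omega)]
    simp
  have hinit : CInv n 0 (List.replicate (n.toNat + 1) 0) [] := by
    refine ⟨h0n, by simp; omega, ?_, by simp, List.Pairwise.nil, ?_⟩
    · intro k h1 h2 h3
      rw [hginit k (by omega) h2] at h3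
      omega
    · intro k h1 h2
      exact hginit k (by omega) h2
  have hfold := cpt_fold_inv n structure_.toList 0 (List.replicate (n.toNat + 1) 0) []
    le_rfl (by rw [hlenq]; ring) hinit
  intro k h1 h2 h3
  exact (hfold.2.2.1 k h1 h2 h3).2.2

-- ===== VERDICT (by name: the statement is the Claim_ definition above) =====
theorem fs_main (s : String) : find_stems s = find_stems_alt s := by
  show fsOuter (create_pair_table s) (PySem.Str.len s) 1 PySem.Set.empty []
    = fsBLoop (create_pair_table s) (PySem.Str.len s) 1 0 0 []
  set pt := create_pair_table s with hpt
  set n := PySem.Str.len s with hn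
  have h0n : 0 ≤ n := by
    rw [hn, PySem.Str.len_eq]
    positivity
  have hinv : Invol pt n := cpt_invol s
  rw [fsOuter_eq_fsOuter2 pt n hinv 1 PySem.Set.empty [] (by norm_num)
    (by intro x hx; cases hx)]
  by_cases hn1 : 1 ≤ n
  · have hF := (grand pt n (n + 1 - 1).toNat 1 rfl).2.1 [] le_rfl hn1
    rw [hF]
    conv_rhs => rw [fsBLoop]
    rw [dif_pos hn1, if_neg (by intro hc; exact absurd hc.1 (by norm_num))]
    have hfl : fsFlush pt 0 0 = [] := by simp [fsFlush]
    rw [hfl, List.append_nil]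
  · rw [fsOuter2]
    rw [if_neg (by omega : ¬ (1 < n))]
    rw [fsBLoop]
    rw [dif_neg hn1]
    have hfl : fsFlush pt 0 0 = [] := by simp [fsFlush]
    rw [hfl, List.append_nil]

theorem find_stems_spec : Claim_equal_find_stems := by
  intro s _
  exact fs_main s
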